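-- pv_equiv track=rewrite | github.com/jdpmk/programming-problems | advent-of-code/2020/day11-2.py | solve
-- ===== SOURCE A (Python) =====
-- def within_bounds(i, j, M, N):
--     return not(i < 0 or i > M - 1 or j < 0 or j > N - 1)
--
-- def solve(data):
--     M, N = len(data), len(data[0])
--     result = [[data[i][j] for j in range(N)] for i in range(M)]
--     DIRS = [(-1, -1), (-1, 0), (-1, 1), (0, -1), (0, 1), (1, -1), (1, 0), (1, 1)]
--     change = True
--     while change:
--         change = False
--         for i in range(M):
--             for j in range(N):
--                 num_occupied = 0
--                 for direction in DIRS: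
--                     new_i = i + direction[0]
--                     new_j = j + direction[1]
--                     while within_bounds(new_i, new_j, M, N) and data[new_i][new_j] == '.':
--                         new_i += direction[0]
--                         new_j += direction[1]
--                     if within_bounds(new_i, new_j, M, N):
--                         if data[new_i][new_j] == '#':
--                             num_occupied += 1
--                 if data[i][j] == 'L' and num_occupied == 0:
--                     change = True
--                     result[i][j] = '#'
--                 if data[i][j] == '#' and num_occupied >= 5:
--                     change = True
--                     result[i][j] = 'L'
--         data = [[result[i][j] for j in range(N)] for i in range(M)]
--
--     occupied_steady_state = 0
--     for i in range(M):
--         for j in range(N):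
--             if result[i][j] == '#':
--                 occupied_steady_state += 1
--     return occupied_steady_state
-- ===== SOURCE B (Python) =====
-- # B: collect the seats once, precompute each seat's visible seat-neighbors as indices
-- # into a compact seat array (the floor is static), then iterate only over that array.
-- def solve(data):
--     M, N = len(data), len(data[0])
--     grid = [row[:N] for row in data]
--     seats = []
--     index = {}
--     for i in range(M):
--         row = grid[i]
--         for j in range(N):
--             if row[j] == 'L' or row[j] == '#':
--                 index[(i, j)] = len(seats)
--                 seats.append((i, j))
--     DIRS = [(-1, -1), (-1, 0), (-1, 1), (0, -1), (0, 1), (1, -1), (1, 0), (1, 1)]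
--     nbrs = []
--     for (i, j) in seats:
--         vis = []
--         for di, dj in DIRS:
--             x, y = i + di, j + dj
--             while 0 <= x < M and 0 <= y < N and grid[x][y] == '.':
--                 x += di
--                 y += dj
--             if 0 <= x < M and 0 <= y < N and (x, y) in index:
--                 vis.append(index[(x, y)])
--         nbrs.append(vis)
--     state = [grid[i][j] for (i, j) in seats]
--     while True:
--         new = []
--         for k in range(len(seats)):
--             c = 0
--             for t in nbrs[k]:
--                 if state[t] == '#':
--                     c += 1
--             v = state[k]
--             if v == 'L' and c == 0:
--                 new.append('#')
--             elif v == '#' and c >= 5: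
--                 new.append('L')
--             else:
--                 new.append(v)
--         if new == state:
--             break
--         state = new
--     return state.count('#')
-- ===== Notes on version B (the rewrite author's own statement) =====
-- stated objective: faster
-- what changed: B collects the seats once and precomputes each seat's visible seat-neighbors as indices into a compact seat array (the floor layout never changes), then iterates the automaton only over that array and stops at a fixpoint, instead of A's re-scanning every direction across the whole grid on every pass.
-- outside the precondition, e.g. on solve([]): A raises IndexError, B raises IndexError; on solve(['LL', 'L']): A raises IndexError, B raises IndexError
import Mathlib
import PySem

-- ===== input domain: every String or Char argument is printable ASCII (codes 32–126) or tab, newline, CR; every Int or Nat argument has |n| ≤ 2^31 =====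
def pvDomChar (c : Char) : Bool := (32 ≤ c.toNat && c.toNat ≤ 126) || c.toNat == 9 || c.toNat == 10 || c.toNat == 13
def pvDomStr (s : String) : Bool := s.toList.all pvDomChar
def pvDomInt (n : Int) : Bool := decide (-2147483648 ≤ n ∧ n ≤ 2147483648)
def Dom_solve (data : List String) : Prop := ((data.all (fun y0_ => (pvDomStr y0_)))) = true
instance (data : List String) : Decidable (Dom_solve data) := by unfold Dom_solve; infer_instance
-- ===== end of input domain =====

-- B collects the seats once and precomputes each seat's visible seat-neighbours as
-- indices into a compact seat array (the floor is static), then iterates only over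
-- that array, instead of re-scanning every direction over the whole grid each pass.

-- shared low-level grid access (bounds-checked indexing; every Python access it models
-- is guarded by an in-bounds check, so the '?' default is never the value Python sees)
def cellN (g : List (List Char)) (i j : Nat) : Char := (g.getD i []).getD j '?'
def cellZ (g : List (List Char)) (i j : Int) : Char :=
  if 0 ≤ i ∧ 0 ≤ j then cellN g i.toNat j.toNat else '?'

def DIRS : List (Int × Int) := [(-1,-1),(-1,0),(-1,1),(0,-1),(0,1),(1,-1),(1,0),(1,1)]

-- fuel for the directional while-loops: each step moves one cell outward, so any
-- in-bounds scan ends within M+N steps; the fuel is never exhausted on a real scan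
def scanFuel (M N : Int) : Nat := M.toNat + N.toNat + 2

-- ===== PORT A =====
def within_bounds (i j M N : Int) : Bool := !(decide (i < 0) || decide (i > M - 1) || decide (j < 0) || decide (j > N - 1))

-- the inner 'while within_bounds ... and data[...] == "."' loop of A
def scanA (g : List (List Char)) (M N di dj : Int) : Int → Int → Nat → Int × Int
  | x, y, 0 => (x, y)
  | x, y, f+1 =>
    if within_bounds x y M N && (cellZ g x y == '.') then
      scanA g M N di dj (x + di) (y + dj) f
    else (x, y)

-- the 'for direction in DIRS' accumulation of num_occupied
def countA (g : List (List Char)) (M N : Int) (i j : Int) : Int :=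
  DIRS.foldl (fun acc d =>
    let p := scanA g M N d.1 d.2 (i + d.1) (j + d.2) (scanFuel M N)
    if within_bounds p.1 p.2 M N && (cellZ g p.1 p.2 == '#') then acc + 1 else acc) 0

-- the two 'if' updates of result[i][j] (they cannot both fire), plus the change flag
def newCellA (g : List (List Char)) (M N : Int) (i j : Nat) : Char × Bool :=
  if cellN g i j == 'L' && countA g M N i j == 0 then ('#', true)
  else if cellN g i j == '#' && decide (5 ≤ countA g M N i j) then ('L', true)
  else (cellN g i j, false)

-- one full pass of the nested for-loops: the new grid and whether anything changed
def passA (g : List (List Char)) (M N : Int) : List (List Char) × Bool :=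
  let cells := (List.range M.toNat).map (fun i => (List.range N.toNat).map (fun j => newCellA g M N i j))
  (cells.map (List.map Prod.fst), cells.any (fun r => r.any Prod.snd))

-- the 'while change' loop; fuel 2^(M*N)+2 bounds the iterations of any terminating
-- run (states repeat only at a fixpoint, and at most 2^(M*N) grids are reachable)
def loopA (M N : Int) : List (List Char) → Nat → List (List Char)
  | g, 0 => g
  | g, f+1 =>
    let pr := passA g M N
    if pr.2 then loopA M N pr.1 f else pr.1

-- [data[i][j] for j in range(N)]: exactly the first N chars, IndexError (none) if shorter
def buildRow (s : List Char) (n : Nat) : Option (List Char) :=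
  if n ≤ s.length then some (s.take n) else none

def solve (data : List String) : Int :=
  match data with
  | [] => 0  -- data[0] raises IndexError; excluded by Pre_solve
  | r0 :: _ =>
    let M : Int := data.length
    let N : Int := r0.toList.length
    match data.mapM (fun s => buildRow s.toList N.toNat) with
    | none => 0  -- some row shorter than data[0]: IndexError; excluded by Pre_solve
    | some g =>
      let res := loopA M N g (2 ^ (M.toNat * N.toNat) + 2)
      (List.range M.toNat).foldl (fun acc i =>
        (List.range N.toNat).foldl (fun acc2 j =>
          if cellN res i j == '#' then acc2 + 1 else acc2) acc) 0

-- ===== PORT B =====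
def inB (x y M N : Int) : Bool := decide (0 ≤ x) && decide (x < M) && decide (0 ≤ y) && decide (y < N)

-- row[j] == 'L' or row[j] == '#'
def isSeat (c : Char) : Bool := c == 'L' || c == '#'

-- B's precompute scan: 'while 0 <= x < M and 0 <= y < N and grid[x][y] == "."'
def scanB (g : List (List Char)) (M N di dj : Int) : Int → Int → Nat → Int × Int
  | x, y, 0 => (x, y)
  | x, y, f+1 =>
    if inB x y M N && (cellZ g x y == '.') then
      scanB g M N di dj (x + di) (y + dj) f
    else (x, y)

-- the nested seat-collecting loop ('seats.append((i, j))' for every seat cell)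
def seatsOf (g : List (List Char)) (M N : Int) : List (Nat × Nat) :=
  (List.range M.toNat).flatMap (fun i =>
    ((List.range N.toNat).filter (fun j => isSeat (cellN g i j))).map (fun j => (i, j)))

-- the index dict: each seat key is inserted (fresh) with the running length of seats,
-- so the finished dict is exactly the seats list paired with the positions 0,1,2,…
def idxOf (seats : List (Nat × Nat)) : PySem.Dict (Nat × Nat) Nat :=
  PySem.Dict.mk seats.zipIdx

-- the if/elif/else rule applied to the old value v with count c
def ruleB (v : Char) (c : Int) : Char :=
  if v == 'L' && c == 0 then '#'
  else if v == '#' && decide (5 ≤ c) then 'L'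
  else v

-- the visible-neighbour seat indices of seat (i,j), computed once on the initial grid
def visB (g : List (List Char)) (M N : Int) (idx : PySem.Dict (Nat × Nat) Nat) (i j : Nat) : List Nat :=
  DIRS.filterMap (fun d =>
    let p := scanB g M N d.1 d.2 ((i : Int) + d.1) ((j : Int) + d.2) (scanFuel M N)
    if inB p.1 p.2 M N then idx.get? (p.1.toNat, p.2.toNat) else none)

-- 'while True: new = [rule(k) for k in range(len(seats))]; if new == state: break',
-- same fuel bound as A's loop
def loopState (nbrs : List (List Nat)) (nseats : Nat) : List Char → Nat → List Char
  | st, 0 => st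
  | st, f+1 =>
    let new := (List.range nseats).map (fun k =>
      ruleB (st.getD k '?')
        ((nbrs.getD k []).foldl (fun a t => if st.getD t '?' == '#' then a + 1 else a) 0))
    if new == st then st else loopState nbrs nseats new f

def solve_alt (data : List String) : Int :=
  match data with
  | [] => 0  -- len(data[0]) raises IndexError; excluded by Pre_solve
  | r0 :: _ =>
    let M : Int := data.length
    let N : Int := r0.toList.length
    let g := data.map (fun s => s.toList.take N.toNat)  -- row[:N]
    let seats := seatsOf g M N
    let nbrs := seats.map (fun p => visB g M N (idxOf seats) p.1 p.2)
    let fin := loopState nbrs seats.length (seats.map (fun p => cellN g p.1 p.2))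
      (2 ^ (M.toNat * N.toNat) + 2)
    (fin.count '#' : Int)

-- ===== PRECONDITION & SPEC =====
-- Pre_ excludes the empty list and grids with a row shorter than the first row: there
-- the Python A raises IndexError (data[0] / data[i][j] with j < len(data[0])).
def Pre_solve (data : List String) : Prop :=
  data ≠ [] ∧ ∀ s ∈ data, (data.headD "").length ≤ s.length
instance (data : List String) : Decidable (Pre_solve data) := by unfold Pre_solve; infer_instance
def pvWitness_solve : List String := ["L.L", "..#", "L#L"]

def Spec_solve (data : List String) (out : Int) : Prop := out = solve_alt data
instance (data : List String) (out : Int) : Decidable (Spec_solve data out) := by unfold Spec_solve; infer_instance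

-- ===== CLAIM (what is proved, stated in full; the proofs are below) =====
def Claim_equal_solve : Prop := ∀ (data : List String), Dom_solve data → Pre_solve data → Spec_solve data (solve data)

-- ===== LEMMAS AND PROOFS =====

-- grid shape: m rows, each of length n
def GShape (g : List (List Char)) (m n : Nat) : Prop :=
  g.length = m ∧ ∀ r ∈ g, r.length = n

-- the floor mask ('.'-positions) of g, seen through cellZ, agrees with g0
def MaskEq (g g0 : List (List Char)) : Prop :=
  ∀ x y : Int, (cellZ g x y == '.') = (cellZ g0 x y == '.')

theorem wb_eq_inB (x y M N : Int) : within_bounds x y M N = inB x y M N := by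
  unfold within_bounds inB
  by_cases h1 : 0 ≤ x <;> by_cases h2 : x < M <;> by_cases h3 : 0 ≤ y <;> by_cases h4 : y < N <;>
    simp_all

theorem scanA_eq_scanB (g g0 : List (List Char)) (M N di dj : Int)
    (h : MaskEq g g0) :
    ∀ (f : Nat) (x y : Int), scanA g M N di dj x y f = scanB g0 M N di dj x y f := by
  intro f
  induction f with
  | zero => intro x y; rfl
  | succ f ih =>
    intro x y
    simp only [scanA, scanB, wb_eq_inB, h x y]
    split <;> simp [ih]

theorem cellN_out (g : List (List Char)) (m n i j : Nat) (hs : GShape g m n)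
    (h : m ≤ i ∨ n ≤ j) : cellN g i j = '?' := by
  obtain ⟨hl, hr⟩ := hs
  unfold cellN
  by_cases hi : i < g.length
  · have hrow : g.getD i [] = g[i] := List.getD_eq_getElem _ _ hi
    have hlen : g[i].length = n := hr _ (List.getElem_mem hi)
    rcases h with h | h
    · exact absurd hi (by omega)
    · rw [hrow, List.getD_eq_default _ _ (by omega)]
  · rw [List.getD_eq_default g [] (by omega)]; rfl

theorem cellN_getElem (g : List (List Char)) (i j : Nat) (hi : i < g.length)
    (hj : j < g[i].length) : cellN g i j = g[i][j] := by
  unfold cellN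
  rw [List.getD_eq_getElem _ _ hi, List.getD_eq_getElem _ _ hj]

theorem maskEq_of_cells (g g0 : List (List Char)) (m n : Nat)
    (hs : GShape g m n) (hs0 : GShape g0 m n)
    (h : ∀ i j : Nat, i < m → j < n → ((cellN g i j = '.') ↔ (cellN g0 i j = '.'))) :
    MaskEq g g0 := by
  intro x y
  unfold cellZ
  split
  · by_cases hi : x.toNat < m
    · by_cases hj : y.toNat < n
      · have hiff := h _ _ hi hj
        by_cases hcc : cellN g x.toNat y.toNat = '.'
        · rw [hcc, hiff.mp hcc]
        · have hcc0 : cellN g0 x.toNat y.toNat ≠ '.' := fun hc => hcc (hiff.mpr hc)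
          simp [hcc, hcc0]
      · rw [cellN_out g m n _ _ hs (by omega), cellN_out g0 m n _ _ hs0 (by omega)]
    · rw [cellN_out g m n _ _ hs (by omega), cellN_out g0 m n _ _ hs0 (by omega)]
  · rfl

theorem newCellA_snd_false (g : List (List Char)) (M N : Int) (i j : Nat)
    (h : (newCellA g M N i j).2 = false) : (newCellA g M N i j).1 = cellN g i j := by
  revert h
  unfold newCellA
  split_ifs with h1 h2 <;> intro h
  · simp at h
  · simp at h
  · rfl

theorem newCellA_snd_true (g : List (List Char)) (M N : Int) (i j : Nat)
    (h : (newCellA g M N i j).2 = true) : (newCellA g M N i j).1 ≠ cellN g i j := by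
  revert h
  unfold newCellA
  split_ifs with h1 h2 <;> intro h
  · simp only [Bool.and_eq_true, beq_iff_eq] at h1
    rw [h1.1]; simp
  · simp only [Bool.and_eq_true, beq_iff_eq] at h2
    rw [h2.1]; simp
  · simp at h

theorem passA_snd_def (g : List (List Char)) (M N : Int) :
    (passA g M N).2 = ((List.range M.toNat).map (fun i =>
      (List.range N.toNat).map (fun j => newCellA g M N i j))).any (fun r => r.any Prod.snd) := rfl

theorem passA_fst_def (g : List (List Char)) (M N : Int) :
    (passA g M N).1 = ((List.range M.toNat).map (fun i =>
      (List.range N.toNat).map (fun j => newCellA g M N i j))).map (List.map Prod.fst) := rfl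

theorem passA_shape (g : List (List Char)) (m n : Nat) :
    GShape (passA g (m : Int) (n : Int)).1 m n := by
  constructor
  · rw [passA_fst_def]; simp
  · intro r hr
    rw [passA_fst_def] at hr
    simp only [Int.toNat_natCast, List.map_map, List.mem_map] at hr
    obtain ⟨i, hi, rfl⟩ := hr
    simp

theorem passA_fst_getElem (g : List (List Char)) (m n i j : Nat)
    (_hi : i < m) (_hj : j < n)
    (h1 : i < (passA g (m : Int) (n : Int)).1.length)
    (h2 : j < (passA g (m : Int) (n : Int)).1[i].length) :
    (passA g (m : Int) (n : Int)).1[i][j] = (newCellA g (m : Int) (n : Int) i j).1 := by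
  unfold passA
  simp

theorem rebuild_eq (g : List (List Char)) (m n : Nat) (hs : GShape g m n) :
    (List.range m).map (fun i => (List.range n).map (fun j => cellN g i j)) = g := by
  obtain ⟨hl, hr⟩ := hs
  apply List.ext_getElem
  · simp [hl]
  · intro i h1 h2
    simp only [List.getElem_map, List.getElem_range]
    apply List.ext_getElem
    · simp [hr _ (List.getElem_mem h2)]
    · intro j hj1 hj2
      simp only [List.getElem_map, List.getElem_range]
      exact cellN_getElem g i j h2 hj2

theorem mapM_buildRow (data : List String) (n : Nat)
    (h : ∀ s ∈ data, n ≤ s.toList.length) :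
    data.mapM (fun s => buildRow s.toList n) = some (data.map (fun s => s.toList.take n)) := by
  induction data with
  | nil => rfl
  | cons s t ih =>
    have hs : buildRow s.toList n = some (s.toList.take n) := by
      unfold buildRow
      rw [if_pos (h s (by simp))]
    simp only [List.mapM_cons, hs, ih (fun x hx => h x (by simp [hx])), List.map_cons]
    rfl

theorem pass_flag_iff (g : List (List Char)) (m n : Nat) (hs : GShape g m n) :
    (passA g (m : Int) (n : Int)).2 = false ↔ (passA g (m : Int) (n : Int)).1 = g := by
  constructor
  · intro hf
    rw [passA_snd_def] at hf
    simp only [Int.toNat_natCast] at hf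
    have hall : ∀ i, i < m → ∀ j, j < n → (newCellA g (m : Int) (n : Int) i j).2 = false := by
      intro i hi j hj
      by_contra hx
      rw [Bool.not_eq_false] at hx
      have hmem1 : (List.range n).map (fun j => newCellA g (m : Int) (n : Int) i j) ∈
          (List.range m).map (fun i => (List.range n).map (fun j => newCellA g (m : Int) (n : Int) i j)) :=
        List.mem_map_of_mem (List.mem_range.mpr hi)
      have hmem2 : newCellA g (m : Int) (n : Int) i j ∈
          (List.range n).map (fun j => newCellA g (m : Int) (n : Int) i j) :=
        List.mem_map_of_mem (List.mem_range.mpr hj)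
      have h1 := (List.any_eq_false.mp hf) _ hmem1
      exact h1 (List.any_eq_true.mpr ⟨_, hmem2, hx⟩)
    rw [passA_fst_def]
    simp only [Int.toNat_natCast, List.map_map]
    calc (List.range m).map (List.map Prod.fst ∘ fun i => (List.range n).map (fun j => newCellA g (m:Int) (n:Int) i j))
        = (List.range m).map (fun i => (List.range n).map (fun j => cellN g i j)) := by
          apply List.map_congr_left
          intro i hi
          rw [List.mem_range] at hi
          simp only [Function.comp, List.map_map]
          apply List.map_congr_left
          intro j hj
          rw [List.mem_range] at hj
          exact newCellA_snd_false _ _ _ _ _ (hall i hi j hj)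
      _ = g := rebuild_eq g m n hs
  · intro heq
    by_contra hf
    rw [Bool.not_eq_false, passA_snd_def] at hf
    simp only [Int.toNat_natCast] at hf
    obtain ⟨r, hr, hrt⟩ := List.any_eq_true.mp hf
    obtain ⟨i, hi, rfl⟩ := List.mem_map.mp hr
    rw [List.mem_range] at hi
    obtain ⟨c, hc, hct⟩ := List.any_eq_true.mp hrt
    obtain ⟨j, hj, rfl⟩ := List.mem_map.mp hc
    rw [List.mem_range] at hj
    have hne := newCellA_snd_true g (m : Int) (n : Int) i j hct
    have h1 : i < (passA g (m : Int) (n : Int)).1.length := by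
      have := (passA_shape g m n).1; omega
    have h2 : j < (passA g (m : Int) (n : Int)).1[i].length := by
      have := (passA_shape g m n).2 _ (List.getElem_mem h1); omega
    have hcell : cellN (passA g (m : Int) (n : Int)).1 i j = (newCellA g (m : Int) (n : Int) i j).1 := by
      rw [cellN_getElem _ i j h1 h2]
      exact passA_fst_getElem g m n i j hi hj h1 h2
    rw [heq] at hcell
    exact hne hcell.symm

-- ---------- B-side lemmas: seats, index dict, compact state ----------

def stOf (g : List (List Char)) (seats : List (Nat × Nat)) : List Char :=
  seats.map (fun p => cellN g p.1 p.2)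

-- loop invariant: g has shape m×n, seat cells (of g0) still hold 'L'/'#', all other
-- cells are unchanged from g0
def InvS (g0 g : List (List Char)) (m n : Nat) : Prop :=
  GShape g m n ∧ ∀ i j : Nat, i < m → j < n →
    (if isSeat (cellN g0 i j) then isSeat (cellN g i j) = true else cellN g i j = cellN g0 i j)

theorem mem_seatsOf (g0 : List (List Char)) (m n : Nat) (p : Nat × Nat) :
    p ∈ seatsOf g0 (m : Int) (n : Int) ↔
      p.1 < m ∧ p.2 < n ∧ isSeat (cellN g0 p.1 p.2) = true := by
  unfold seatsOf
  simp only [Int.toNat_natCast, List.mem_flatMap, List.mem_map, List.mem_filter, List.mem_range]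
  constructor
  · rintro ⟨i, hi, j, ⟨hj, hseat⟩, rfl⟩
    exact ⟨hi, hj, hseat⟩
  · rintro ⟨h1, h2, h3⟩
    exact ⟨p.1, h1, p.2, ⟨h2, h3⟩, rfl⟩

theorem get?_zipIdx_some (l : List (Nat × Nat)) :
    ∀ (k0 : Nat) (p : Nat × Nat) (t : Nat),
      (PySem.Dict.mk (l.zipIdx k0)).get? p = some t →
      k0 ≤ t ∧ l[t - k0]? = some p := by
  induction l with
  | nil => intro k0 p t h; simp [PySem.Dict.get?] at h
  | cons a l ih =>
    intro k0 p t h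
    rw [List.zipIdx_cons, PySem.Dict.get?_mk_cons] at h
    by_cases hap : (a == p) = true
    · rw [if_pos hap] at h
      obtain rfl : k0 = t := by simpa using h
      refine ⟨le_refl _, ?_⟩
      simp [beq_iff_eq.mp hap]
    · rw [if_neg hap] at h
      obtain ⟨h1, h2⟩ := ih (k0 + 1) p t h
      refine ⟨by omega, ?_⟩
      have hsub : t - k0 = (t - (k0 + 1)) + 1 := by omega
      rw [hsub, List.getElem?_cons_succ]
      exact h2

theorem get?_zipIdx_none (l : List (Nat × Nat)) :
    ∀ (k0 : Nat) (p : Nat × Nat),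
      (PySem.Dict.mk (l.zipIdx k0)).get? p = none → p ∉ l := by
  induction l with
  | nil => intro _ _ _; simp
  | cons a l ih =>
    intro k0 p h
    rw [List.zipIdx_cons, PySem.Dict.get?_mk_cons] at h
    by_cases hap : (a == p) = true
    · rw [if_pos hap] at h; simp at h
    · rw [if_neg hap] at h
      intro hmem
      rcases List.mem_cons.mp hmem with rfl | hmem
      · simp at hap
      · exact ih (k0 + 1) p h hmem

theorem stOf_getD (g : List (List Char)) (seats : List (Nat × Nat)) (t : Nat)
    (ht : t < seats.length) :
    (stOf g seats).getD t '?' = cellN g (seats[t]).1 (seats[t]).2 := by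
  unfold stOf
  rw [List.getD_eq_getElem _ _ (by simp [ht])]
  simp

theorem seat_ne_dot (c : Char) (h : isSeat c = true) : c ≠ '.' := by
  unfold isSeat at h
  rcases Bool.or_eq_true_iff.mp h with h | h <;> rw [beq_iff_eq.mp h] <;> simp

theorem not_seat_ne_hash (c : Char) (h : ¬ isSeat c = true) : (c == '#') = false := by
  unfold isSeat at h
  simp only [Bool.or_eq_true_iff, not_or] at h
  simpa using h.2

theorem maskEq_of_inv (g0 g : List (List Char)) (m n : Nat)
    (hs0 : GShape g0 m n) (hinv : InvS g0 g m n) : MaskEq g g0 := by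
  apply maskEq_of_cells g g0 m n hinv.1 hs0
  intro i j hi hj
  have h := hinv.2 i j hi hj
  split at h
  · next hseat =>
    constructor
    · intro hc; exact absurd hc (seat_ne_dot _ h)
    · intro hc; exact absurd hc (seat_ne_dot _ hseat)
  · rw [h]

theorem cellN_passA (g : List (List Char)) (m n i j : Nat) (hi : i < m) (hj : j < n) :
    cellN (passA g (m : Int) (n : Int)).1 i j = (newCellA g (m : Int) (n : Int) i j).1 := by
  have h1 : i < (passA g (m : Int) (n : Int)).1.length := by
    have := (passA_shape g m n).1; omega
  have h2 : j < (passA g (m : Int) (n : Int)).1[i].length := by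
    have := (passA_shape g m n).2 _ (List.getElem_mem h1); omega
  rw [cellN_getElem _ i j h1 h2]
  exact passA_fst_getElem g m n i j hi hj h1 h2

theorem newCellA_fst_ruleB (g : List (List Char)) (M N : Int) (i j : Nat) :
    (newCellA g M N i j).1 = ruleB (cellN g i j) (countA g M N (i : Int) (j : Int)) := by
  unfold newCellA ruleB
  split_ifs <;> rfl

theorem inv_pass (g0 g : List (List Char)) (m n : Nat) (hinv : InvS g0 g m n) :
    InvS g0 (passA g (m : Int) (n : Int)).1 m n := by
  refine ⟨passA_shape g m n, ?_⟩
  intro i j hi hj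
  rw [cellN_passA g m n i j hi hj]
  have h := hinv.2 i j hi hj
  split at h <;> split
  · next hseat hseat' =>
    unfold newCellA
    split_ifs with h1 h2
    · rfl
    · rfl
    · exact h
  · next hseat hseat' => exact absurd hseat hseat'
  · next hseat hseat' => exact absurd hseat' hseat
  · next hseat hseat' =>
    have hL : (cellN g i j == 'L') = false := by
      rw [h]
      unfold isSeat at hseat
      simp only [Bool.or_eq_true_iff, not_or] at hseat
      simpa using hseat.1
    have hH : (cellN g i j == '#') = false := by
      rw [h]; exact not_seat_ne_hash _ hseat
    unfold newCellA
    rw [if_neg (by simp [hL]), if_neg (by simp [hH])]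
    exact h

theorem count_eq_seat (g0 g : List (List Char)) (m n : Nat)
    (hs0 : GShape g0 m n) (hinv : InvS g0 g m n) (i j : Nat) :
    countA g (m : Int) (n : Int) (i : Int) (j : Int) =
      (visB g0 (m : Int) (n : Int) (idxOf (seatsOf g0 (m : Int) (n : Int))) i j).foldl
        (fun a t => if (stOf g (seatsOf g0 (m : Int) (n : Int))).getD t '?' == '#' then a + 1 else a) 0 := by
  unfold countA visB
  rw [List.foldl_filterMap]
  apply PySem.List.foldl_congr_mem
  intro acc d _
  simp only [scanA_eq_scanB g g0 (m : Int) (n : Int) d.1 d.2 (maskEq_of_inv g0 g m n hs0 hinv), wb_eq_inB]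
  by_cases hb : inB (scanB g0 (↑m) (↑n) d.1 d.2 (↑i + d.1) (↑j + d.2) (scanFuel ↑m ↑n)).1
      (scanB g0 (↑m) (↑n) d.1 d.2 (↑i + d.1) (↑j + d.2) (scanFuel ↑m ↑n)).2 ↑m ↑n = true
  · set p := scanB g0 (↑m) (↑n) d.1 d.2 (↑i + d.1) (↑j + d.2) (scanFuel ↑m ↑n) with hp
    have hx : 0 ≤ p.1 ∧ p.1 < (m : Int) ∧ 0 ≤ p.2 ∧ p.2 < (n : Int) := by
      unfold inB at hb; simp only [Bool.and_eq_true, decide_eq_true_eq] at hb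
      exact ⟨hb.1.1.1, hb.1.1.2, hb.1.2, hb.2⟩
    have hcz : cellZ g p.1 p.2 = cellN g p.1.toNat p.2.toNat := by
      unfold cellZ; rw [if_pos ⟨hx.1, hx.2.2.1⟩]
    have hbm : p.1.toNat < m := by omega
    have hbn : p.2.toNat < n := by omega
    cases hg : (idxOf (seatsOf g0 (m : Int) (n : Int))).get? (p.1.toNat, p.2.toNat) with
    | some t =>
      obtain ⟨-, hsome⟩ := get?_zipIdx_some _ 0 _ t hg
      simp only [Nat.sub_zero] at hsome
      obtain ⟨ht, he⟩ := List.getElem?_eq_some_iff.mp hsome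
      have hst : (stOf g (seatsOf g0 (m : Int) (n : Int))).getD t '?' = cellN g p.1.toNat p.2.toNat := by
        rw [stOf_getD _ _ t ht, he]
      rw [List.getD_eq_getElem?_getD] at hst
      simp only [hb, hg, hcz]
      simp [hst]
    | none =>
      have hnm : (p.1.toNat, p.2.toNat) ∉ seatsOf g0 (m : Int) (n : Int) :=
        get?_zipIdx_none _ 0 _ hg
      have hns : ¬ isSeat (cellN g0 p.1.toNat p.2.toNat) = true := by
        intro hcon
        exact hnm ((mem_seatsOf g0 m n _).mpr ⟨hbm, hbn, hcon⟩)
      have hcell : cellN g p.1.toNat p.2.toNat = cellN g0 p.1.toNat p.2.toNat := by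
        have h := hinv.2 _ _ hbm hbn
        rw [if_neg hns] at h
        exact h
      have hnh : (cellN g p.1.toNat p.2.toNat == '#') = false := by
        rw [hcell]; exact not_seat_ne_hash _ hns
      simp only [hb, hg, hcz]
      simp [hnh]
  · simp [hb]

theorem step_eq_state (g0 g : List (List Char)) (m n : Nat)
    (hs0 : GShape g0 m n) (hinv : InvS g0 g m n) :
    (List.range (seatsOf g0 (m : Int) (n : Int)).length).map (fun k =>
      ruleB ((stOf g (seatsOf g0 (m : Int) (n : Int))).getD k '?')
        ((((seatsOf g0 (m : Int) (n : Int)).map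
            (fun p => visB g0 (m : Int) (n : Int) (idxOf (seatsOf g0 (m : Int) (n : Int))) p.1 p.2)).getD k []).foldl
          (fun a t => if (stOf g (seatsOf g0 (m : Int) (n : Int))).getD t '?' == '#' then a + 1 else a) 0))
      = stOf (passA g (m : Int) (n : Int)).1 (seatsOf g0 (m : Int) (n : Int)) := by
  apply List.ext_getElem
  · simp [stOf]
  · intro k h1 h2
    simp only [List.getElem_map, List.getElem_range]
    have hk : k < (seatsOf g0 (m : Int) (n : Int)).length := by simpa using h1
    have hmem := List.getElem_mem hk
    obtain ⟨hbm, hbn, -⟩ := (mem_seatsOf g0 m n _).mp hmem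
    have hnb : (((seatsOf g0 (m : Int) (n : Int)).map
        (fun p => visB g0 (m : Int) (n : Int) (idxOf (seatsOf g0 (m : Int) (n : Int))) p.1 p.2)).getD k [])
        = visB g0 (m : Int) (n : Int) (idxOf (seatsOf g0 (m : Int) (n : Int)))
            ((seatsOf g0 (m : Int) (n : Int))[k]).1 ((seatsOf g0 (m : Int) (n : Int))[k]).2 := by
      rw [List.getD_eq_getElem _ _ (by simp [hk])]
      simp
    rw [hnb, stOf_getD _ _ k hk, ← count_eq_seat g0 g m n hs0 hinv _ _]
    have hst : (stOf (passA g (m : Int) (n : Int)).1 (seatsOf g0 (m : Int) (n : Int)))[k]'h2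
        = cellN (passA g (m : Int) (n : Int)).1 ((seatsOf g0 (m : Int) (n : Int))[k]).1
            ((seatsOf g0 (m : Int) (n : Int))[k]).2 := by
      unfold stOf
      simp
    rw [hst, cellN_passA g m n _ _ hbm hbn, newCellA_fst_ruleB]

theorem stOf_eq_iff (g0 g g' : List (List Char)) (m n : Nat)
    (hinv : InvS g0 g m n) (hinv' : InvS g0 g' m n) :
    stOf g' (seatsOf g0 (m : Int) (n : Int)) = stOf g (seatsOf g0 (m : Int) (n : Int)) ↔ g' = g := by
  constructor
  · intro h
    have hcells : ∀ i j : Nat, i < m → j < n → cellN g' i j = cellN g i j := by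
      intro i j hi hj
      by_cases hseat : isSeat (cellN g0 i j) = true
      · have hmem : (i, j) ∈ seatsOf g0 (m : Int) (n : Int) :=
          (mem_seatsOf g0 m n _).mpr ⟨hi, hj, hseat⟩
        obtain ⟨k, hk, he⟩ := List.getElem_of_mem hmem
        have hgetd := congrArg (fun l => l.getD k '?') h
        simp only [stOf_getD _ _ k hk] at hgetd
        rw [he] at hgetd
        exact hgetd
      · have h1 := hinv.2 i j hi hj
        have h2 := hinv'.2 i j hi hj
        rw [if_neg hseat] at h1 h2
        rw [h1, h2]
    obtain ⟨hl', hr'⟩ := hinv'.1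
    obtain ⟨hl, hr⟩ := hinv.1
    apply List.ext_getElem (by omega)
    intro i hi1 hi2
    apply List.ext_getElem
    · rw [hr' _ (List.getElem_mem hi1), hr _ (List.getElem_mem hi2)]
    · intro j hj1 hj2
      have := hcells i j (by omega) (by rw [hr' _ (List.getElem_mem hi1)] at hj1; omega)
      rwa [cellN_getElem g' i j hi1 hj1, cellN_getElem g i j hi2 hj2] at this
  · intro h; rw [h]

theorem loop_eq_state (g0 : List (List Char)) (m n : Nat) (hs0 : GShape g0 m n) :
    ∀ (f : Nat) (g : List (List Char)), InvS g0 g m n →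
      stOf (loopA (m : Int) (n : Int) g f) (seatsOf g0 (m : Int) (n : Int))
        = loopState ((seatsOf g0 (m : Int) (n : Int)).map
            (fun p => visB g0 (m : Int) (n : Int) (idxOf (seatsOf g0 (m : Int) (n : Int))) p.1 p.2))
            (seatsOf g0 (m : Int) (n : Int)).length
            (stOf g (seatsOf g0 (m : Int) (n : Int))) f := by
  intro f
  induction f with
  | zero => intro g _; rfl
  | succ f ih =>
    intro g hinv
    simp only [loopA, loopState]
    rw [step_eq_state g0 g m n hs0 hinv]
    cases hflag : (passA g (m : Int) (n : Int)).2 with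
    | false =>
      have heq := (pass_flag_iff g m n hinv.1).mp hflag
      simp [heq]
    | true =>
      have hne : (passA g (m : Int) (n : Int)).1 ≠ g := by
        intro h
        have hff := (pass_flag_iff g m n hinv.1).mpr h
        rw [hflag] at hff
        simp at hff
      have hsne : stOf (passA g (m : Int) (n : Int)).1 (seatsOf g0 (m : Int) (n : Int))
          ≠ stOf g (seatsOf g0 (m : Int) (n : Int)) := by
        intro h
        exact hne ((stOf_eq_iff g0 g _ m n hinv (inv_pass g0 g m n hinv)).mp h)
      rw [if_pos rfl, if_neg (by simpa using hsne)]
      exact ih _ (inv_pass g0 g m n hinv)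

theorem inv_loop (g0 : List (List Char)) (m n : Nat) :
    ∀ (f : Nat) (g : List (List Char)), InvS g0 g m n →
      InvS g0 (loopA (m : Int) (n : Int) g f) m n := by
  intro f
  induction f with
  | zero => intro g hinv; exact hinv
  | succ f ih =>
    intro g hinv
    simp only [loopA]
    split
    · exact ih _ (inv_pass g0 g m n hinv)
    · exact inv_pass g0 g m n hinv

theorem inv_init (g0 : List (List Char)) (m n : Nat) (hs0 : GShape g0 m n) :
    InvS g0 g0 m n := by
  refine ⟨hs0, ?_⟩
  intro i j _ _
  split
  · next h => exact h
  · rfl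

theorem final_count (g0 res : List (List Char)) (m n : Nat)
    (hs0 : GShape g0 m n) (hinv : InvS g0 res m n) :
    (List.range m).foldl (fun acc i =>
      (List.range n).foldl (fun acc2 j => if cellN res i j == '#' then acc2 + 1 else acc2) acc) 0
    = ((stOf res (seatsOf g0 (m : Int) (n : Int))).count '#' : Int) := by
  have hinner : ∀ (acc : Int), ∀ i ∈ List.range m,
      (List.range n).foldl (fun acc2 j => if cellN res i j == '#' then acc2 + 1 else acc2) acc
      = acc + ((List.range n).countP (fun j => cellN res i j == '#') : Int) := by
    intro acc i _
    exact PySem.List.foldl_if_add_one _ _ _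
  rw [PySem.List.foldl_congr_mem _ _ _ _ hinner, PySem.List.foldl_add]
  unfold stOf seatsOf
  rw [List.count_eq_countP, List.countP_map, List.countP_flatMap, Nat.cast_list_sum, List.map_map]
  simp only [Int.toNat_natCast]
  rw [zero_add]
  apply congrArg
  apply List.map_congr_left
  intro i hi
  rw [List.mem_range] at hi
  simp only [Function.comp_apply, Function.comp]
  rw [List.countP_map, List.countP_filter]
  apply congrArg
  apply List.countP_congr
  intro j hj
  rw [List.mem_range] at hj
  by_cases hq : (cellN res i j == '#') = true
  · have hseat : isSeat (cellN g0 i j) = true := by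
      by_contra hns
      have h := hinv.2 i j hi hj
      rw [if_neg hns] at h
      rw [h, not_seat_ne_hash _ hns] at hq
      exact Bool.false_ne_true hq
    simp [hq, hseat]
  · rw [Bool.not_eq_true] at hq
    simp [hq]

theorem solve_spec : Claim_equal_solve := by
  intro data _ hpre
  unfold Spec_solve
  obtain ⟨hne, hlen⟩ := hpre
  match data with
  | [] => exact absurd rfl hne
  | r0 :: rest =>
    simp only [List.headD_cons] at hlen
    simp only [solve, solve_alt]
    set m := (r0 :: rest).length with hm
    set n := r0.toList.length with hn
    have hlen' : ∀ s ∈ r0 :: rest, n ≤ s.toList.length := by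
      intro s hsmem
      have := hlen s hsmem
      simp only [hn]
      have e1 : r0.length = r0.toList.length := by simp
      have e2 : s.length = s.toList.length := by simp
      omega
    have hN : ((n : Int)).toNat = n := Int.toNat_natCast n
    rw [hN, mapM_buildRow _ n hlen']
    set g := (r0 :: rest).map (fun s => s.toList.take n) with hg
    have hshape : GShape g m n := by
      constructor
      · rw [hg, hm]; simp
      · intro r hrm
        rw [hg] at hrm
        obtain ⟨s, hsm, rfl⟩ := List.mem_map.mp hrm
        have := hlen' s hsm
        simp only [List.length_take]
        omega
    have hM : ((m : Int)).toNat = m := Int.toNat_natCast m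
    simp only [hM]
    have hinv0 := inv_init g m n hshape
    have hinvres := inv_loop g m n (2 ^ (m * n) + 2) g hinv0
    rw [final_count g _ m n hshape hinvres,
        loop_eq_state g m n hshape (2 ^ (m * n) + 2) g hinv0]
    rfl
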